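-- pv_equiv track=rewrite | github.com/toshi123/mst-rag | scripts/rename_archives_from_tsv.py | split_filenames
-- ===== SOURCE A (Python) =====
-- import unicodedata
-- from typing import List, Dict, Tuple, Optional
--
-- def normalize_text(text: str) -> str:
--     if text is None:
--         return ""
--     return unicodedata.normalize("NFKC", str(text)).strip()
--
-- def split_filenames(cell_value: str) -> List[str]:
--     """
--     区切りは ', ' と改行のみ。
--     '、' は区切りとして扱わない。
--     """
--     value = normalize_text(cell_value)
--     if not value:
--         return []
--
--     lines = [v.strip() for v in value.splitlines() if v.strip()]
--     parts: List[str] = []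
--
--     for line in lines if lines else [value]:
--         if ", " in line:
--             parts.extend([p.strip() for p in line.split(", ") if p.strip()])
--         else:
--             parts.append(line.strip())
--
--     return [p for p in parts if p]
-- ===== SOURCE B (Python) =====
-- import unicodedata
--
-- def split_filenames(cell_value):
--     """Single left-to-right scan: a state machine over the normalized text that
--     cuts a token at each ', ' pair or line break, strips it and keeps it if
--     non-empty -- no intermediate line/part lists."""
--     text = unicodedata.normalize("NFKC", cell_value)
--     out = []
--     token = []
--     i, n = 0, len(text)
--     while i < n:
--         ch = text[i]
--         if ch == ',' and i + 1 < n and text[i + 1] == ' ':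
--             t = ''.join(token).strip()
--             if t:
--                 out.append(t)
--             token = []
--             i += 2
--         elif ch in '\n\r':
--             t = ''.join(token).strip()
--             if t:
--                 out.append(t)
--             token = []
--             i += 1
--         else:
--             token.append(ch)
--             i += 1
--     t = ''.join(token).strip()
--     if t:
--         out.append(t)
--     return out
-- ===== Notes on version B (the rewrite author's own statement) =====
-- stated objective: alternative
-- what changed: A's staged pipeline (strip the whole cell, splitlines, strip and filter the lines, then per line an 'is ", " contained' branch with split/strip/filter and a final emptiness filter) is replaced by a single left-to-right state-machine scan that cuts a token at every ', ' pair or line-break character, stripping each token as it is emitted and keeping it if non-empty.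
-- intended difference: On cells containing a comma immediately followed by a space with only blanks up to the next line break or the end of the cell, A returns the preceding token with the trailing comma attached (its per-line strip destroys the comma-space separator before splitting), while B still treats the comma-space pair as a separator and returns the token without the comma, the intended behaviour since the function documents comma-space and line breaks as the only separators. — e.g. on split_filenames("a, "): A returns ["a,"], B returns ["a"]
import Mathlib
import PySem

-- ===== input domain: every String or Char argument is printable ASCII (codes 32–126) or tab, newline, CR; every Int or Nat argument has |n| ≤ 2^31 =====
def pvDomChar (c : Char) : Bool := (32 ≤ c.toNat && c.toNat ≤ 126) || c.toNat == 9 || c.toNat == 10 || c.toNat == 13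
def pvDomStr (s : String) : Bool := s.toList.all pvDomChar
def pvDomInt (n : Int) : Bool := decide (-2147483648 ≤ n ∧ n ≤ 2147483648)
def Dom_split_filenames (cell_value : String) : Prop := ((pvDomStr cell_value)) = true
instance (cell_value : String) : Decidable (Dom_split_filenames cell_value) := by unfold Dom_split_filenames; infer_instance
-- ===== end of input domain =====

-- B replaces A's staged pipeline (splitlines, per-line strip and comma-space split, three filters) by a
-- single left-to-right state-machine scan that cuts tokens at comma-space pairs and line breaks
-- (objective: alternative single-pass algorithm).

-- ===== PORT A =====
-- NFKC normalization (normalize_text) is the identity on the printable-ASCII/tab/newline/CR domain,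
-- so normalize_text(cell_value) is ported as strip of the characters.
def split_filenames (cell_value : String) : List String :=
  let value := PySem.Chars.strip cell_value.toList
  if value.isEmpty then []
  else
    let lines := ((PySem.Chars.splitlines value).map PySem.Chars.strip).filter (fun v => !v.isEmpty)
    let parts := (if lines.isEmpty then [value] else lines).foldl
      (fun parts line =>
        if PySem.Chars.isIn [',', ' '] line then
          parts ++ (((PySem.Chars.splitOn line [',', ' ']).map PySem.Chars.strip).filter (fun p => !p.isEmpty))
        else
          parts ++ [PySem.Chars.strip line]) []
    (parts.filter (fun p => !p.isEmpty)).map (fun cs => String.ofList cs)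

-- ===== PORT B =====
-- Source B's emit step: strip the pending token, append it to out if non-empty.
def pvEmit (out : List (List Char)) (token : List Char) : List (List Char) :=
  let t := PySem.Chars.strip token
  if t.isEmpty then out else out ++ [t]

-- Source B's while-loop: one scan; 'ch == "," and i+1 < n and text[i+1] == " "' is the
-- head?-test on the remaining characters, 'i += 2' is rest.tail.
def pvScan : List Char → List Char → List (List Char) → List (List Char)
  | [], token, out => pvEmit out token
  | ',' :: ' ' :: rest, token, out => pvScan rest [] (pvEmit out token)
  | c :: rest, token, out =>
      if c == '\n' || c == '\r' then pvScan rest [] (pvEmit out token)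
      else pvScan rest (token ++ [c]) out

def split_filenames_alt (cell_value : String) : List String :=
  (pvScan cell_value.toList [] []).map (fun cs => String.ofList cs)

-- ===== PRECONDITION & SPEC =====
-- On inputs that contain a ", " whose space is part of trailing line whitespace (a ',' followed
-- by ' ' and then only blanks up to the next line break or the end), A returns the token with the
-- comma still attached (its per-line strip destroys the separator before splitting), while B
-- still treats the pair as a separator and returns the token without the comma — the intended
-- behaviour, since the function documents comma-space and line breaks as the only separators.
def D_split_filenames (cell_value : String) : Prop :=
  ∃ t ∈ cell_value.toList.tails, [',', ' '].isPrefixOf t = true ∧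
    ∀ c ∈ (t.drop 2).takeWhile (fun c => !(c == '\n' || c == '\x0d')), c = ' ' ∨ c = '\t' 
instance (cell_value : String) : Decidable (D_split_filenames cell_value) := by unfold D_split_filenames; infer_instance

def Spec_split_filenames (cell_value : String) (out : List String) : Prop := ¬ D_split_filenames cell_value → out = split_filenames_alt cell_value
instance (cell_value : String) (out : List String) : Decidable (Spec_split_filenames cell_value out) := by unfold Spec_split_filenames; infer_instance

def pvDiffWitness_split_filenames : String := "a, "
def pvDiffWitnessOut_split_filenames : (List String) × (List String) := (["a,"], ["a"])

-- ===== CLAIM (what is proved, stated in full; the proofs are below) =====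
def Claim_unchanged_split_filenames : Prop := ∀ (cell_value : String), Dom_split_filenames cell_value → Spec_split_filenames cell_value (split_filenames cell_value)
def Claim_changed_split_filenames : Prop := Dom_split_filenames (pvDiffWitness_split_filenames) ∧ D_split_filenames (pvDiffWitness_split_filenames) ∧ split_filenames (pvDiffWitness_split_filenames) = pvDiffWitnessOut_split_filenames.1 ∧ split_filenames_alt (pvDiffWitness_split_filenames) = pvDiffWitnessOut_split_filenames.2 ∧ pvDiffWitnessOut_split_filenames.1 ≠ pvDiffWitnessOut_split_filenames.2

-- ===== LEMMAS AND PROOFS =====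

-- proof-only helper forms
def pvEolWsB : List Char → Bool
  | [] => true
  | c :: r => if c == '\n' || c == '\x0d' then true else if c == ' ' || c == '\t' then pvEolWsB r else false

def pvEatenHere : List Char → Bool
  | ',' :: ' ' :: z => pvEolWsB z
  | _ => false

def pvEatenB : List Char → Bool
  | [] => false
  | ',' :: ' ' :: r => pvEolWsB r || pvEatenB r
  | _ :: r => pvEatenB r

def pvFlat (L : List (List Char)) : List (List Char) :=
  (L.flatMap (fun line => (PySem.Chars.splitOn (PySem.Chars.strip line) [',', ' ']).map PySem.Chars.strip)).filter (fun p => !p.isEmpty)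

def pvContinue : List Char → List (List Char) → List (List Char)
  | [], o => o
  | _ :: r, o => pvScan r [] o

def pvLineSplit : List Char → List Char → List (List Char)
  | [], tok => [tok]
  | ',' :: ' ' :: r, tok => tok :: pvLineSplit r []
  | c :: r, tok => pvLineSplit r (tok ++ [c])

theorem pv_rstrip_prefix (s : List Char) : PySem.Chars.rstrip s <+: s := by
  simp only [PySem.Chars.rstrip]
  exact List.reverse_suffix.mp (by simpa using List.dropWhile_suffix (l := s.reverse) PySem.Chars.isspace)

theorem pv_strip_head (c : Char) (t : List Char) (s : List Char)
    (h : PySem.Chars.strip s = c :: t) : PySem.Chars.isspace c = false := by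
  have hpre : PySem.Chars.rstrip (PySem.Chars.lstrip s) <+: PySem.Chars.lstrip s :=
    pv_rstrip_prefix _
  rw [PySem.Chars.strip] at h
  rw [h] at hpre
  have hne : PySem.Chars.lstrip s ≠ [] := by
    intro hnil; rw [hnil] at hpre; simp at hpre
  have hhead : (PySem.Chars.lstrip s).head hne = c := by
    have := (List.IsPrefix.head hpre (by simp)).symm
    simpa using this
  have hh := List.head_dropWhile_not PySem.Chars.isspace (l := s)
    (w := by simpa [PySem.Chars.lstrip] using hne)
  have : (PySem.Chars.lstrip s).head hne = (List.dropWhile PySem.Chars.isspace s).head (by simpa [PySem.Chars.lstrip] using hne) := by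
    simp [PySem.Chars.lstrip]
  rw [hhead] at this
  rw [← this] at hh
  exact hh

theorem pv_strip_cons_ne_nil (c : Char) (t : List Char) (hc : PySem.Chars.isspace c = false) :
    PySem.Chars.strip (c :: t) ≠ [] := by
  simp only [PySem.Chars.strip, PySem.Chars.lstrip, PySem.Chars.rstrip, List.dropWhile_cons, hc]
  intro hnil
  simp only [if_neg (by simp : ¬ (false = true)), List.reverse_eq_nil_iff, List.dropWhile_eq_nil_iff] at hnil
  have := hnil c (by simp)
  simp [hc] at this

theorem pv_strip_idem (s : List Char) :
    PySem.Chars.strip (PySem.Chars.strip s) = PySem.Chars.strip s := by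
  rw [PySem.Chars.strip, PySem.Chars.strip]
  cases h : PySem.Chars.rstrip (PySem.Chars.lstrip s) with
  | nil => simp [PySem.Chars.lstrip, PySem.Chars.rstrip]
  | cons c t =>
    have hc : PySem.Chars.isspace c = false := pv_strip_head c t s (by rw [PySem.Chars.strip]; exact h)
    have hl : PySem.Chars.lstrip (c :: t) = c :: t := by simp [PySem.Chars.lstrip, hc]
    rw [hl, ← h]
    simp only [PySem.Chars.rstrip]
    rw [List.reverse_reverse]
    cases h2 : List.dropWhile PySem.Chars.isspace (PySem.Chars.lstrip s).reverse with
    | nil => simp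
    | cons d u =>
      have hd : PySem.Chars.isspace d = false := by
        have := List.head_dropWhile_not PySem.Chars.isspace (l := (PySem.Chars.lstrip s).reverse) (w := by simp [h2])
        simpa [h2] using this
      simp [hd]

theorem pv_splitlines_go_acc_aux (isB : Char → Bool) (l cur : List Char) (acc₀ : List (List Char)) :
    ∀ acc, PySem.Chars.splitlines.go isB l cur acc = acc.reverse ++ PySem.Chars.splitlines.go isB l cur [] := by
  induction l, cur, acc₀ using PySem.Chars.splitlines.go.induct isB with
  | case1 cur acc₀ h =>
    intro acc; rw [PySem.Chars.splitlines.go, PySem.Chars.splitlines.go]; simp [h]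
  | case2 cur acc₀ h =>
    intro acc; rw [PySem.Chars.splitlines.go, PySem.Chars.splitlines.go]; simp [h]
  | case3 rest cur acc₀ ih =>
    intro acc
    rw [PySem.Chars.splitlines.go, PySem.Chars.splitlines.go]
    rw [ih (cur.reverse :: acc), ih [cur.reverse]]
    simp
  | case4 c rest cur acc₀ hne hb ih =>
    intro acc
    rw [PySem.Chars.splitlines.go, PySem.Chars.splitlines.go] <;> try exact hne
    simp only [hb, if_pos]
    rw [ih (cur.reverse :: acc), ih [cur.reverse]]
    simp
  | case5 c rest cur acc₀ hne hb ih =>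
    intro acc
    rw [PySem.Chars.splitlines.go, PySem.Chars.splitlines.go] <;> try exact hne
    simp only [Bool.not_eq_true] at hb
    simp only [hb, Bool.false_eq_true, if_false]
    exact ih acc

theorem pv_splitlines_go_first_aux (isB : Char → Bool) (l cur : List Char) (acc₀ : List (List Char)) :
    ∀ acc, cur ≠ [] →
      ∃ u r, PySem.Chars.splitlines.go isB l cur acc = acc.reverse ++ (cur.reverse ++ u) :: r := by
  induction l, cur, acc₀ using PySem.Chars.splitlines.go.induct isB with
  | case1 cur acc₀ h =>
    intro acc hcur; exact absurd (List.isEmpty_iff.mp h) hcur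
  | case2 cur acc₀ h =>
    intro acc hcur
    refine ⟨[], [], ?_⟩
    rw [PySem.Chars.splitlines.go]; simp [h]
  | case3 rest cur acc₀ ih =>
    intro acc hcur
    rw [PySem.Chars.splitlines.go]
    rw [pv_splitlines_go_acc_aux isB rest [] [] (cur.reverse :: acc)]
    exact ⟨[], PySem.Chars.splitlines.go isB rest [] [], by simp⟩
  | case4 c rest cur acc₀ hne hb ih =>
    intro acc hcur
    rw [PySem.Chars.splitlines.go] <;> try exact hne
    simp only [hb, if_pos]
    rw [pv_splitlines_go_acc_aux isB rest [] [] (cur.reverse :: acc)]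
    exact ⟨[], PySem.Chars.splitlines.go isB rest [] [], by simp⟩
  | case5 c rest cur acc₀ hne hb ih =>
    intro acc hcur
    rw [PySem.Chars.splitlines.go] <;> try exact hne
    simp only [Bool.not_eq_true] at hb
    simp only [hb, Bool.false_eq_true, if_false]
    obtain ⟨u, r, hur⟩ := ih acc (by simp)
    exact ⟨[c] ++ u, r, by simpa using hur⟩

theorem pv_splitlines_go_first_top (isB : Char → Bool) (c : Char) (rest : List Char)
    (hb : isB c = false) (hr : c ≠ '\x0d') :
    ∃ u r, PySem.Chars.splitlines.go isB (c :: rest) [] [] = (c :: u) :: r := by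
  rw [PySem.Chars.splitlines.go]
  case x_3 => intro r1 hc _; exact hr hc
  simp only [hb, Bool.false_eq_true, if_false]
  obtain ⟨u, r, hur⟩ := pv_splitlines_go_first_aux isB rest [c] [] [] (by simp)
  exact ⟨u, r, by simpa using hur⟩

theorem pv_splitlines_first (c : Char) (rest : List Char) (hc : PySem.Chars.isspace c = false) :
    ∃ u r, PySem.Chars.splitlines (c :: rest) = (c :: u) :: r := by
  rw [PySem.Chars.splitlines]
  apply pv_splitlines_go_first_top
  · simp only [PySem.Chars.isspace] at hc
    simp only [Bool.or_eq_false_iff, decide_eq_false_iff_not, Bool.and_eq_false_iff] at hc ⊢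
    omega
  · intro h
    subst h
    simp [PySem.Chars.isspace] at hc

theorem pv_splitOn_go_not_infix (n : Nat) : ∀ (s cur : List Char) (acc : List (List Char)),
    s.length < n → ¬ [',', ' '] <:+: s →
    PySem.Chars.splitOn.go [',', ' '] n s cur acc = ((cur.reverse ++ s) :: acc).reverse := by
  induction n with
  | zero => intro s cur acc h; omega
  | succ m ih =>
    intro s cur acc hlen hinf
    cases s with
    | nil => rw [PySem.Chars.splitOn.go] <;> simp
    | cons c rest =>
      rw [PySem.Chars.splitOn.go]
      have hpre : [',', ' '].isPrefixOf (c :: rest) = false := by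
        rw [Bool.eq_false_iff]
        intro hp
        exact hinf (List.IsPrefix.isInfix (List.isPrefixOf_iff_prefix.mp hp))
      simp only [hpre, Bool.false_eq_true, if_false]
      rw [ih rest (c :: cur) acc (by simpa using Nat.lt_of_succ_lt_succ (by simpa using hlen))
        (fun h => hinf (h.trans (List.suffix_cons c rest).isInfix))]
      simp

theorem pv_splitOn_not_infix (s : List Char) (h : ¬ [',', ' '] <:+: s) :
    PySem.Chars.splitOn s [',', ' '] = [s] := by
  rw [PySem.Chars.splitOn, pv_splitOn_go_not_infix (s.length + 1) s [] [] (by omega) h]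
  simp

theorem pv_flatMap_filter {α β : Type} (p : α → Bool) (f : α → List β) (xs : List α)
    (h : ∀ x ∈ xs, p x = false → f x = []) :
    xs.flatMap f = (xs.filter p).flatMap f := by
  induction xs with
  | nil => rfl
  | cons x t ih =>
    by_cases hp : p x = true
    · simp [hp, ih (fun y hy => h y (List.mem_cons_of_mem x hy))]
    · simp only [Bool.not_eq_true] at hp
      simp [hp, h x (by simp) hp, ih (fun y hy => h y (List.mem_cons_of_mem x hy))]

theorem pv_splitlines_nil : PySem.Chars.splitlines ([] : List Char) = [] := rfl

theorem pv_core (L' : List (List Char)) :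
    List.filter (fun p => !p.isEmpty)
      (List.flatMap
        (fun line =>
          if PySem.Chars.isIn [',', ' '] line then
            ((PySem.Chars.splitOn line [',', ' ']).map PySem.Chars.strip).filter (fun p => !p.isEmpty)
          else [PySem.Chars.strip line])
        ((L'.map PySem.Chars.strip).filter (fun v => !v.isEmpty)))
    = List.filter (fun p => !p.isEmpty)
        (L'.flatMap (fun line => (PySem.Chars.splitOn (PySem.Chars.strip line) [',', ' ']).map PySem.Chars.strip)) := by
  rw [List.filter_flatMap, List.filter_flatMap]
  rw [pv_flatMap_filter (fun l => !(PySem.Chars.strip l).isEmpty)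
        (fun l => List.filter (fun p => !p.isEmpty)
          ((PySem.Chars.splitOn (PySem.Chars.strip l) [',', ' ']).map PySem.Chars.strip)) L'
        (by
          intro x _ hx
          simp only [Bool.not_eq_false', List.isEmpty_iff] at hx
          simp only [hx]
          rfl)]
  rw [List.filter_map, List.flatMap_map]
  apply List.flatMap_congr
  intro x hx
  have hxne : PySem.Chars.strip x ≠ [] := by
    have := (List.mem_filter.mp hx).2
    simpa using this
  have hidem : PySem.Chars.strip (PySem.Chars.strip x) = PySem.Chars.strip x := pv_strip_idem x
  by_cases hin : PySem.Chars.isIn [',', ' '] (PySem.Chars.strip x) = true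
  · simp only [hin, if_pos]
    rw [List.filter_filter]
    simp
  · simp only [Bool.not_eq_true] at hin
    have hsp : PySem.Chars.splitOn (PySem.Chars.strip x) [',', ' '] = [PySem.Chars.strip x] :=
      pv_splitOn_not_infix _ ((PySem.Chars.isIn_eq_false_iff _ _).mp hin)
    simp only [hin, Bool.false_eq_true, if_false, hsp]
    simp [hidem, hxne]

-- A's value as the staged "flat" pipeline over the stripped input
theorem pv_A_flat (cell : String) :
    split_filenames cell
      = (pvFlat (PySem.Chars.splitlines (PySem.Chars.strip cell.toList))).map (fun cs => String.ofList cs) := by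
  simp only [split_filenames, pvFlat]
  by_cases hv : PySem.Chars.strip cell.toList = []
  · rw [hv, pv_splitlines_nil]
    simp
  · obtain ⟨c, rest, hcr⟩ := List.exists_cons_of_ne_nil hv
    have hc : PySem.Chars.isspace c = false := pv_strip_head c rest cell.toList hcr
    obtain ⟨u, r, hsl⟩ := pv_splitlines_first c rest hc
    have hne1 : PySem.Chars.strip (c :: u) ≠ [] := pv_strip_cons_ne_nil c u hc
    rw [hcr, hsl]
    have hlines :
        (((((c :: u) :: r).map PySem.Chars.strip).filter (fun v => !v.isEmpty))).isEmpty = false := by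
      simp only [List.map_cons, List.filter_cons]
      simp [hne1]
    simp only [List.isEmpty_cons, Bool.false_eq_true, if_false, hlines]
    have hfold :
        (fun (parts : List (List Char)) line =>
            if PySem.Chars.isIn [',', ' '] line then
              parts ++ ((PySem.Chars.splitOn line [',', ' ']).map PySem.Chars.strip).filter (fun p => !p.isEmpty)
            else parts ++ [PySem.Chars.strip line])
          = fun parts line => parts ++
              (if PySem.Chars.isIn [',', ' '] line then
                ((PySem.Chars.splitOn line [',', ' ']).map PySem.Chars.strip).filter (fun p => !p.isEmpty)
              else [PySem.Chars.strip line]) := by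
      funext parts line; split_ifs <;> rfl
    rw [hfold, PySem.List.foldl_append_eq_flatMap]
    rw [List.nil_append]
    rw [pv_core ((c :: u) :: r)]

theorem pv_char_eq {c d : Char} (h : c.toNat = d.toNat) : c = d :=
  Char.ext (UInt32.toNat_inj.mp h)

theorem pv_dom_ws (c : Char) (hd : pvDomChar c = true) (hs : PySem.Chars.isspace c = true) :
    c = ' ' ∨ c = '\t' ∨ c = '\n' ∨ c = '\x0d' := by
  have h1 : c.toNat = 32 ∨ c.toNat = 9 ∨ c.toNat = 10 ∨ c.toNat = 13 := by
    simp only [pvDomChar, PySem.Chars.isspace, Bool.or_eq_true, Bool.and_eq_true,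
      decide_eq_true_eq, beq_iff_eq, Nat.beq_eq_true_eq] at hd hs
    omega
  rcases h1 with h | h | h | h
  · exact Or.inl (pv_char_eq h)
  · exact Or.inr (Or.inl (pv_char_eq h))
  · exact Or.inr (Or.inr (Or.inl (pv_char_eq h)))
  · exact Or.inr (Or.inr (Or.inr (pv_char_eq h)))

theorem pv_dropWhile_all {α : Type} (p : α → Bool) (l t : List α) (h : ∀ x ∈ l, p x = true) :
    List.dropWhile p (l ++ t) = List.dropWhile p t := by
  induction l with
  | nil => rfl
  | cons c l ih =>
    simp only [List.cons_append, List.dropWhile_cons, h c (by simp), if_pos]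
    exact ih (fun x hx => h x (by simp [hx]))

theorem pv_lstrip_ws (w t : List Char) (h : ∀ c ∈ w, PySem.Chars.isspace c = true) :
    PySem.Chars.lstrip (w ++ t) = PySem.Chars.lstrip t :=
  pv_dropWhile_all _ w t h

theorem pv_rstrip_ws (t w : List Char) (h : ∀ c ∈ w, PySem.Chars.isspace c = true) :
    PySem.Chars.rstrip (t ++ w) = PySem.Chars.rstrip t := by
  simp only [PySem.Chars.rstrip, List.reverse_append]
  rw [pv_dropWhile_all _ w.reverse t.reverse (fun x hx => h x (by simpa using hx))]

theorem pv_strip_ws_prefix (w t : List Char) (h : ∀ c ∈ w, PySem.Chars.isspace c = true) :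
    PySem.Chars.strip (w ++ t) = PySem.Chars.strip t := by
  simp only [PySem.Chars.strip]
  rw [pv_lstrip_ws w t h]

theorem pv_strip_allws (l : List Char) (h : ∀ c ∈ l, PySem.Chars.isspace c = true) :
    PySem.Chars.strip l = [] := by
  have hl : PySem.Chars.lstrip l = [] := by
    simp only [PySem.Chars.lstrip, List.dropWhile_eq_nil_iff]
    exact fun x hx => h x hx
  simp [PySem.Chars.strip, hl, PySem.Chars.rstrip]

theorem pv_lstrip_append (t w : List Char) :
    PySem.Chars.lstrip (t ++ w) =
      if PySem.Chars.lstrip t = [] then PySem.Chars.lstrip w else PySem.Chars.lstrip t ++ w := by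
  induction t with
  | nil => simp [PySem.Chars.lstrip]
  | cons c t ih =>
    by_cases hc : PySem.Chars.isspace c = true
    · simpa [PySem.Chars.lstrip, List.dropWhile_cons, hc] using ih
    · simp only [Bool.not_eq_true] at hc
      simp [PySem.Chars.lstrip, List.dropWhile_cons, hc]

theorem pv_strip_ws_suffix (t w : List Char) (h : ∀ c ∈ w, PySem.Chars.isspace c = true) :
    PySem.Chars.strip (t ++ w) = PySem.Chars.strip t := by
  simp only [PySem.Chars.strip, pv_lstrip_append]
  by_cases hn : PySem.Chars.lstrip t = []
  · have hw : PySem.Chars.lstrip w = [] := by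
      simp only [PySem.Chars.lstrip, List.dropWhile_eq_nil_iff]
      exact h
    simp [hn, hw, PySem.Chars.rstrip]
  · simp only [hn, if_neg, if_false]
    exact pv_rstrip_ws _ _ h

theorem pv_emit_nil (out : List (List Char)) : pvEmit out [] = out := by
  simp [pvEmit, PySem.Chars.strip, PySem.Chars.lstrip, PySem.Chars.rstrip]

theorem pv_emit_congr (out : List (List Char)) (a b : List Char)
    (h : PySem.Chars.strip a = PySem.Chars.strip b) : pvEmit out a = pvEmit out b := by
  simp [pvEmit, h]

theorem pv_emit_eq (out : List (List Char)) (tok : List Char) :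
    pvEmit out tok = out ++ (([tok].map PySem.Chars.strip).filter (fun p => !p.isEmpty)) := by
  simp only [pvEmit, List.map_cons, List.map_nil, List.filter]
  by_cases h : (PySem.Chars.strip tok).isEmpty
  · simp [h]
  · simp only [Bool.not_eq_true] at h
    simp [h]

theorem pv_scan_nil (tok : List Char) (out : List (List Char)) :
    pvScan [] tok out = pvEmit out tok := rfl

theorem pv_scan_delim (r tok : List Char) (out : List (List Char)) :
    pvScan (',' :: ' ' :: r) tok out = pvScan r [] (pvEmit out tok) := rfl

theorem pv_scan_cons (c : Char) (r tok : List Char) (out : List (List Char))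
    (h : ¬(c = ',' ∧ r.head? = some ' ')) :
    pvScan (c :: r) tok out =
      if (c == '\n' || c == '\x0d') = true then pvScan r [] (pvEmit out tok)
      else pvScan r (tok ++ [c]) out := by
  rw [pvScan.eq_def]
  split
  · rename_i heq
    exact (List.cons_ne_nil _ _ heq).elim
  · rename_i heq
    injection heq with hc hr
    exact absurd ⟨hc, by rw [hr]; rfl⟩ h
  · rename_i heq
    injection heq with hc hr
    subst hc; subst hr; rfl

theorem pv_ls_nil (tok : List Char) : pvLineSplit [] tok = [tok] := rfl

theorem pv_ls_delim (r tok : List Char) :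
    pvLineSplit (',' :: ' ' :: r) tok = tok :: pvLineSplit r [] := rfl

theorem pv_ls_cons (c : Char) (r tok : List Char) (h : ¬(c = ',' ∧ r.head? = some ' ')) :
    pvLineSplit (c :: r) tok = pvLineSplit r (tok ++ [c]) := by
  rw [pvLineSplit.eq_def]
  split
  · rename_i heq
    exact (List.cons_ne_nil _ _ heq).elim
  · rename_i heq
    injection heq with hc hr
    exact absurd ⟨hc, by rw [hr]; rfl⟩ h
  · rename_i heq
    injection heq with hc hr
    subst hc; subst hr; rfl

theorem pv_eaten_nil : pvEatenB [] = false := rfl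

theorem pv_eaten_delim (r : List Char) :
    pvEatenB (',' :: ' ' :: r) = (pvEolWsB r || pvEatenB r) := rfl

theorem pv_eaten_cons (c : Char) (r : List Char) (h : ¬(c = ',' ∧ r.head? = some ' ')) :
    pvEatenB (c :: r) = pvEatenB r := by
  rw [pvEatenB.eq_def]
  split
  · rename_i heq
    exact (List.cons_ne_nil _ _ heq).elim
  · rename_i heq
    injection heq with hc hr
    exact absurd ⟨hc, by rw [hr]; rfl⟩ h
  · rename_i heq
    injection heq with hc hr
    subst hc; subst hr; rfl

theorem pv_no_of_hno {c : Char} {r : List Char}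
    (hno : ∀ rest, c = ',' → r = ' ' :: rest → False) : ¬(c = ',' ∧ r.head? = some ' ') := by
  rintro ⟨h1, h2⟩
  cases r with
  | nil => simp at h2
  | cons r0 r' =>
    simp only [List.head?_cons, Option.some.injEq] at h2
    exact hno r' h1 (by rw [h2])

theorem pv_eatenHere_cons (c : Char) (r : List Char) (h : ¬(c = ',' ∧ r.head? = some ' ')) :
    pvEatenHere (c :: r) = false := by
  rw [pvEatenHere.eq_def]
  split
  · rename_i heq
    injection heq with hc hr
    exact absurd ⟨hc, by rw [hr]; rfl⟩ h
  · rfl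

theorem pv_D_eq (s : List Char) : s.tails.any pvEatenHere = pvEatenB s := by
  induction s using pvEatenB.induct with
  | case1 => rfl
  | case2 z ih =>
    rw [pv_eaten_delim]
    rw [List.tails_cons, List.any_cons, List.tails_cons, List.any_cons]
    have h1 : pvEatenHere (',' :: ' ' :: z) = pvEolWsB z := rfl
    have h2 : pvEatenHere (' ' :: z) = false := by
      rw [pv_eatenHere_cons]
      rintro ⟨h, -⟩
      exact absurd h (by decide)
    rw [h1, h2, ih]
    simp [Bool.or_assoc]
  | case3 c r hno ih =>
    rw [List.tails_cons, List.any_cons, pv_eatenHere_cons c r (pv_no_of_hno hno), ih,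
      pv_eaten_cons c r (pv_no_of_hno hno)]
    simp

theorem pv_eolws_append (z t : List Char) (hz : pvEolWsB z = true) (ht : pvEolWsB t = true) :
    pvEolWsB (z ++ t) = true := by
  induction z with
  | nil => simpa
  | cons c z ih =>
    simp only [pvEolWsB, List.cons_append] at hz ⊢
    by_cases h1 : (c == '\n' || c == '\x0d') = true
    · simp [h1]
    · simp only [h1, if_false] at hz ⊢
      by_cases h2 : (c == ' ' || c == '\t') = true
      · simp only [h2, if_true] at hz ⊢
        exact ih hz
      · simp [h2] at hz

theorem pv_eolws_of_ws (z : List Char) (hd : ∀ c ∈ z, pvDomChar c = true)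
    (hw : ∀ c ∈ z, PySem.Chars.isspace c = true) : pvEolWsB z = true := by
  induction z with
  | nil => rfl
  | cons c z ih =>
    have ih' := ih (fun x hx => hd x (by simp [hx])) (fun x hx => hw x (by simp [hx]))
    rcases pv_dom_ws c (hd c (by simp)) (hw c (by simp)) with h | h | h | h <;> subst h <;>
      simp [pvEolWsB, ih']

theorem pv_eaten_append_left (x y : List Char) (hy : pvEatenB y = true) :
    pvEatenB (x ++ y) = true := by
  induction x using pvEatenB.induct with
  | case1 => simpa
  | case2 r ih =>
    rw [List.cons_append, List.cons_append, pv_eaten_delim]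
    simp [ih]
  | case3 c r hno ih =>
    rw [List.cons_append]
    by_cases hp : c = ',' ∧ (r ++ y).head? = some ' '
    · obtain ⟨hc, hh⟩ := hp
      subst hc
      cases r with
      | nil =>
        cases y with
        | nil => simp at hh
        | cons y0 y' =>
          simp only [List.nil_append, List.head?_cons, Option.some.injEq] at hh ⊢
          subst hh
          rw [pv_eaten_delim]
          have h2 : pvEatenB (' ' :: y') = pvEatenB y' := by
            rw [pv_eaten_cons]
            rintro ⟨h1, -⟩
            exact absurd h1 (by decide)
          rw [h2] at hy
          simp [hy]
      | cons r0 r' =>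
        simp only [List.cons_append, List.head?_cons, Option.some.injEq] at hh
        exact (hno r' rfl (by rw [hh])).elim
    · rw [pv_eaten_cons _ _ hp]
      exact ih

theorem pv_eaten_append_right (M t : List Char) (ht : pvEolWsB t = true) (hM : pvEatenB M = true) :
    pvEatenB (M ++ t) = true := by
  induction M using pvEatenB.induct with
  | case1 => simp [pv_eaten_nil] at hM
  | case2 r ih =>
    rw [pv_eaten_delim] at hM
    rw [List.cons_append, List.cons_append, pv_eaten_delim]
    rcases Bool.or_eq_true_iff.mp hM with h | h
    · simp [pv_eolws_append r t h ht]
    · simp [ih h]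
  | case3 c r hno ih =>
    have hM' : pvEatenB r = true := by
      rw [pv_eaten_cons _ _ (pv_no_of_hno hno)] at hM
      exact hM
    rw [List.cons_append]
    by_cases hp : c = ',' ∧ (r ++ t).head? = some ' '
    · obtain ⟨hc, hh⟩ := hp
      subst hc
      cases r with
      | nil => simp [pv_eaten_nil] at hM'
      | cons r0 r' =>
        simp only [List.cons_append, List.head?_cons, Option.some.injEq] at hh
        exact (hno r' rfl (by rw [hh])).elim
    · rw [pv_eaten_cons _ _ hp]
      exact ih hM'

theorem pv_eaten_junction (w1 m w2 : List Char) (hd : ∀ c ∈ w2, pvDomChar c = true)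
    (hw : ∀ c ∈ w2, PySem.Chars.isspace c = true)
    (hm : m.getLast? = some ',') (h2 : w2.head? = some ' ') :
    pvEatenB (w1 ++ m ++ w2) = true := by
  obtain ⟨m0, hm0⟩ := List.getLast?_eq_some_iff.mp hm
  cases w2 with
  | nil => simp at h2
  | cons w0 w2' =>
    simp only [List.head?_cons, Option.some.injEq] at h2
    subst h2
    subst hm0
    have heq : w1 ++ (m0 ++ [',']) ++ (' ' :: w2') = (w1 ++ m0) ++ (',' :: ' ' :: w2') := by
      simp
    rw [heq]
    apply pv_eaten_append_left
    rw [pv_eaten_delim]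
    have : pvEolWsB w2' = true :=
      pv_eolws_of_ws w2' (fun x hx => hd x (by simp [hx])) (fun x hx => hw x (by simp [hx]))
    simp [this]

theorem pv_strip_decomp (L : List Char) :
    L = List.takeWhile PySem.Chars.isspace L
        ++ (PySem.Chars.strip L
        ++ (List.takeWhile PySem.Chars.isspace (PySem.Chars.lstrip L).reverse).reverse) := by
  conv_lhs => rw [← List.takeWhile_append_dropWhile (p := PySem.Chars.isspace) (l := L)]
  congr 1
  show PySem.Chars.lstrip L = _
  conv_lhs => rw [← List.reverse_reverse (PySem.Chars.lstrip L)]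
  conv_lhs =>
    rw [← List.takeWhile_append_dropWhile (p := PySem.Chars.isspace) (l := (PySem.Chars.lstrip L).reverse)]
  rw [List.reverse_append]
  rfl

theorem pv_eaten_strip (L : List Char) (hd : ∀ c ∈ L, pvDomChar c = true)
    (h : pvEatenB (PySem.Chars.strip L) = true) : pvEatenB L = true := by
  have hdec := pv_strip_decomp L
  set w1 := List.takeWhile PySem.Chars.isspace L with hw1
  set w2 := (List.takeWhile PySem.Chars.isspace (PySem.Chars.lstrip L).reverse).reverse with hw2
  have hw2ws : ∀ c ∈ w2, PySem.Chars.isspace c = true := by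
    intro c hc
    rw [hw2, List.mem_reverse] at hc
    exact List.mem_takeWhile_imp hc
  have hw2dom : ∀ c ∈ w2, pvDomChar c = true := by
    intro c hc
    apply hd
    rw [hdec]
    simp only [List.mem_append]
    right; right; exact hc
  rw [hdec]
  exact pv_eaten_append_left _ _
    (pv_eaten_append_right _ _ (pv_eolws_of_ws w2 hw2dom hw2ws) h)

theorem pv_ls_ws (w tok : List Char) (hw : ∀ c ∈ w, PySem.Chars.isspace c = true) :
    pvLineSplit w tok = [tok ++ w] := by
  induction w generalizing tok with
  | nil => simp [pv_ls_nil]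
  | cons c w' ih =>
    have hc : ¬ c = ',' := by
      intro h
      subst h
      exact absurd (hw ',' (by simp)) (by decide)
    rw [pv_ls_cons c w' tok (fun hp => hc hp.1)]
    rw [ih (tok ++ [c]) (fun x hx => hw x (by simp [hx]))]
    simp

theorem pv_ls_ws_prefix (w v tok : List Char) (hw : ∀ c ∈ w, PySem.Chars.isspace c = true) :
    pvLineSplit (w ++ v) tok = pvLineSplit v (tok ++ w) := by
  induction w generalizing tok with
  | nil => simp
  | cons c w' ih =>
    have hc : ¬ c = ',' := by
      intro h
      subst h
      exact absurd (hw ',' (by simp)) (by decide)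
    rw [List.cons_append, pv_ls_cons c (w' ++ v) tok (fun hp => hc hp.1)]
    rw [ih (tok ++ [c]) (fun x hx => hw x (by simp [hx]))]
    simp

theorem pv_ls_tok_aux (n : Nat) : ∀ (v tok : List Char), v.length ≤ n →
    pvLineSplit v tok = (tok ++ (pvLineSplit v []).headI) :: (pvLineSplit v []).tail := by
  induction n with
  | zero =>
    intro v tok hv
    have : v = [] := List.eq_nil_of_length_eq_zero (Nat.le_zero.mp hv)
    subst this
    simp [pv_ls_nil]
  | succ n ih =>
    intro v tok hv
    cases v with
    | nil => simp [pv_ls_nil]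
    | cons c r =>
      by_cases hp : c = ',' ∧ r.head? = some ' '
      · obtain ⟨hc, hh⟩ := hp
        subst hc
        cases r with
        | nil => simp at hh
        | cons r0 r' =>
          simp only [List.head?_cons, Option.some.injEq] at hh
          subst hh
          rw [pv_ls_delim, pv_ls_delim]
          simp
      · rw [pv_ls_cons c r tok hp, pv_ls_cons c r [] hp]
        have hr : r.length ≤ n := by
          simpa using Nat.lt_succ_iff.mp (by simpa using hv)
        rw [ih r (tok ++ [c]) hr, ih r ([] ++ [c]) hr]
        simp

theorem pv_ls_tok (v tok : List Char) :
    pvLineSplit v tok = (tok ++ (pvLineSplit v []).headI) :: (pvLineSplit v []).tail :=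
  pv_ls_tok_aux v.length v tok le_rfl

theorem pv_ls_ws_suffix_aux (n : Nat) : ∀ (u w tok : List Char),
    u.length ≤ n →
    (∀ c ∈ w, PySem.Chars.isspace c = true) →
    ¬(w.head? = some ' ' ∧ u.getLast? = some ',') →
    (pvLineSplit (u ++ w) tok).map PySem.Chars.strip
      = (pvLineSplit u tok).map PySem.Chars.strip := by
  induction n with
  | zero =>
    intro u w tok hu hw hJ
    have : u = [] := List.eq_nil_of_length_eq_zero (Nat.le_zero.mp hu)
    subst this
    rw [List.nil_append, pv_ls_ws w tok hw, pv_ls_nil]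
    simp [pv_strip_ws_suffix tok w hw]
  | succ n ih =>
    intro u w tok hu hw hJ
    cases u with
    | nil =>
      rw [List.nil_append, pv_ls_ws w tok hw, pv_ls_nil]
      simp [pv_strip_ws_suffix tok w hw]
    | cons c r =>
      have hr : r.length ≤ n := by
        simpa using Nat.lt_succ_iff.mp (by simpa using hu)
      by_cases hp : c = ',' ∧ r.head? = some ' '
      · obtain ⟨hc, hh⟩ := hp
        subst hc
        cases r with
        | nil => simp at hh
        | cons r0 r' =>
          simp only [List.head?_cons, Option.some.injEq] at hh
          subst hh
          rw [List.cons_append, List.cons_append, pv_ls_delim, pv_ls_delim]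
          simp only [List.map_cons]
          congr 1
          cases r' with
          | nil =>
            rw [List.nil_append, pv_ls_ws w [] hw, pv_ls_nil]
            have hnil : PySem.Chars.strip ([] : List Char) = [] := rfl
            simp [pv_strip_allws w hw, hnil]
          | cons d r'' =>
            apply ih (d :: r'') w [] (by simpa using Nat.le_of_succ_le hr) hw
            intro ⟨hq1, hq2⟩
            exact hJ ⟨hq1, by simpa using hq2⟩
      · have hp' : ¬(c = ',' ∧ (r ++ w).head? = some ' ') := by
          rintro ⟨h1, h2⟩
          cases r with
          | nil =>
            exact hJ ⟨by simpa using h2, by simp [h1]⟩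
          | cons r0 r' =>
            exact hp ⟨h1, by simpa using h2⟩
        rw [List.cons_append, pv_ls_cons c (r ++ w) tok hp', pv_ls_cons c r tok hp]
        cases r with
        | nil =>
          rw [List.nil_append, pv_ls_ws w (tok ++ [c]) hw, pv_ls_nil]
          have h5 := pv_strip_ws_suffix (tok ++ [c]) w hw
          simp only [List.map_cons, List.map_nil, ← List.append_assoc]
          rw [h5]
        | cons r0 r' =>
          apply ih (r0 :: r') w (tok ++ [c]) hr hw
          intro ⟨hq1, hq2⟩
          exact hJ ⟨hq1, by simpa using hq2⟩

theorem pv_ls_ws_suffix (u w tok : List Char)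
    (hw : ∀ c ∈ w, PySem.Chars.isspace c = true)
    (hJ : ¬(w.head? = some ' ' ∧ u.getLast? = some ',')) :
    (pvLineSplit (u ++ w) tok).map PySem.Chars.strip
      = (pvLineSplit u tok).map PySem.Chars.strip :=
  pv_ls_ws_suffix_aux u.length u w tok le_rfl hw hJ

theorem pv_isPrefix_pair (c : Char) (rest : List Char) :
    [',', ' '].isPrefixOf (c :: rest) = (c == ',' && rest.head? == some ' ') := by
  cases rest with
  | nil => simp [List.isPrefixOf]
  | cons d r' =>
    simp only [List.isPrefixOf, List.head?_cons]
    by_cases h1 : c = ','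
    · subst h1
      by_cases h2 : d = ' '
      · subst h2; simp [List.isPrefixOf]
      · have ha : (' ' == d) = false := beq_eq_false_iff_ne.mpr (Ne.symm h2)
        have hb : (d == ' ') = false := beq_eq_false_iff_ne.mpr h2
        simp [ha, hb]
    · have ha : (',' == c) = false := beq_eq_false_iff_ne.mpr (Ne.symm h1)
      have hb : (c == ',') = false := beq_eq_false_iff_ne.mpr h1
      simp [ha, hb]

theorem pv_eolws_iff (z : List Char) :
    (∀ c ∈ z.takeWhile (fun c => !(c == '\n' || c == '\x0d')), c = ' ' ∨ c = '\t')
      ↔ pvEolWsB z = true := by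
  induction z with
  | nil => simp [pvEolWsB]
  | cons c zr ih =>
    by_cases hb : (c == '\n' || c == '\x0d') = true
    · simp only [List.takeWhile_cons, hb, Bool.not_true, Bool.false_eq_true, if_false,
        pvEolWsB, if_true]
      simp
    · simp only [Bool.not_eq_true] at hb
      simp only [List.takeWhile_cons, hb, Bool.not_false, if_true, List.mem_cons,
        pvEolWsB, Bool.false_eq_true, if_false]
      by_cases hbl : (c == ' ' || c == '\t') = true
      · have hcor : c = ' ' ∨ c = '\t' := by
          rcases Bool.or_eq_true_iff.mp hbl with h | h
          · exact Or.inl (by simpa using h)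
          · exact Or.inr (by simpa using h)
        rw [hbl]
        simp only [if_true]
        constructor
        · intro h
          exact ih.mp (fun x hx => h x (Or.inr hx))
        · intro h x hx
          rcases hx with hx | hx
          · subst hx; exact hcor
          · exact ih.mpr h x hx
      · simp only [Bool.not_eq_true] at hbl
        rw [hbl]
        simp only [Bool.false_eq_true, if_false]
        constructor
        · intro h
          have := h c (Or.inl rfl)
          rcases this with h1 | h1 <;> subst h1 <;> simp at hbl
        · intro h
          cases h

theorem pv_Q_iff (t : List Char) :
    ([',', ' '].isPrefixOf t = true ∧
      ∀ c ∈ (t.drop 2).takeWhile (fun c => !(c == '\n' || c == '\x0d')), c = ' ' ∨ c = '\t')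
    ↔ pvEatenHere t = true := by
  cases t with
  | nil =>
    constructor
    · rintro ⟨h, -⟩
      simp [List.isPrefixOf] at h
    · intro h
      simp [pvEatenHere] at h
  | cons c r =>
    rw [pv_isPrefix_pair]
    by_cases hp : c = ',' ∧ r.head? = some ' '
    · obtain ⟨hc, hh⟩ := hp
      subst hc
      cases r with
      | nil => simp at hh
      | cons r0 z =>
        simp only [List.head?_cons, Option.some.injEq] at hh
        subst hh
        have hE : pvEatenHere (',' :: ' ' :: z) = pvEolWsB z := rfl
        have hD2 : (',' :: ' ' :: z).drop 2 = z := rfl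
        rw [hE, hD2]
        constructor
        · rintro ⟨-, hd⟩
          exact (pv_eolws_iff z).mp hd
        · intro hd
          exact ⟨rfl, (pv_eolws_iff z).mpr hd⟩
    · have hfalse : (c == ',' && r.head? == some ' ') = false := by
        rw [Bool.and_eq_false_iff]
        by_cases h1 : c = ','
        · right
          subst h1
          simp only [beq_eq_false_iff_ne, ne_eq]
          intro hh
          exact hp ⟨rfl, by simpa using hh⟩
        · left; simpa using h1
      rw [hfalse, pv_eatenHere_cons c r hp]
      simp
theorem pv_splitOn_go_eq (n : Nat) : ∀ (l cur : List Char) (acc : List (List Char)),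
    l.length < n →
    PySem.Chars.splitOn.go [',', ' '] n l cur acc = acc.reverse ++ pvLineSplit l cur.reverse := by
  induction n with
  | zero => intro l cur acc h; omega
  | succ m ih =>
    intro l cur acc hlen
    cases l with
    | nil =>
      rw [PySem.Chars.splitOn.go] <;> simp [pv_ls_nil]
    | cons c rest =>
      rw [PySem.Chars.splitOn.go]
      rw [pv_isPrefix_pair]
      by_cases hp : c = ',' ∧ rest.head? = some ' '
      · obtain ⟨hc, hh⟩ := hp
        subst hc
        cases rest with
        | nil => simp at hh
        | cons r0 r' =>
          simp only [List.head?_cons, Option.some.injEq] at hh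
          subst hh
          simp only [beq_self_eq_true, Option.some.injEq, Bool.and_eq_true, and_self, if_pos,
            List.head?_cons, beq_iff_eq, true_and]
          have hdrop : List.drop [',', ' '].length (',' :: ' ' :: r') = r' := by simp
          rw [hdrop]
          rw [ih r' [] (cur.reverse :: acc) (by simp at hlen ⊢; omega)]
          rw [pv_ls_delim]
          simp
      · have hfalse : (c == ',' && rest.head? == some ' ') = false := by
          rw [Bool.and_eq_false_iff]
          by_cases h1 : c = ','
          · right
            subst h1
            simp only [beq_eq_false_iff_ne, ne_eq]
            intro hh
            exact hp ⟨rfl, by simpa using hh⟩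
          · left; simpa using h1
        rw [hfalse]
        simp only [Bool.false_eq_true, if_false]
        rw [ih rest (c :: cur) acc (by simp at hlen ⊢; omega)]
        rw [pv_ls_cons c rest cur.reverse hp]
        simp

theorem pv_splitOn_eq_lineSplit (a : List Char) :
    PySem.Chars.splitOn a [',', ' '] = pvLineSplit a [] := by
  rw [PySem.Chars.splitOn, pv_splitOn_go_eq (a.length + 1) a [] [] (by omega)]
  simp

theorem pv_line (a : List Char) (hd : ∀ c ∈ a, pvDomChar c = true)
    (he : pvEatenB a = false) :
    ((pvLineSplit a []).map PySem.Chars.strip).filter (fun p => !p.isEmpty)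
      = ((PySem.Chars.splitOn (PySem.Chars.strip a) [',', ' ']).map PySem.Chars.strip).filter
          (fun p => !p.isEmpty) := by
  have hdec := pv_strip_decomp a
  set w1 := List.takeWhile PySem.Chars.isspace a with hw1def
  set w2 := (List.takeWhile PySem.Chars.isspace (PySem.Chars.lstrip a).reverse).reverse with hw2def
  set m := PySem.Chars.strip a with hmdef
  have hw1ws : ∀ c ∈ w1, PySem.Chars.isspace c = true := by
    intro c hc
    exact List.mem_takeWhile_imp hc
  have hw2ws : ∀ c ∈ w2, PySem.Chars.isspace c = true := by
    intro c hc
    rw [hw2def, List.mem_reverse] at hc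
    exact List.mem_takeWhile_imp hc
  have hw2dom : ∀ c ∈ w2, pvDomChar c = true := by
    intro c hc
    apply hd
    rw [hdec]
    simp only [List.mem_append]
    right; right; exact hc
  have hJ : ¬(w2.head? = some ' ' ∧ m.getLast? = some ',') := by
    rintro ⟨hq1, hq2⟩
    have hj := pv_eaten_junction w1 m w2 hw2dom hw2ws hq2 hq1
    rw [List.append_assoc, ← hdec] at hj
    rw [hj] at he
    exact absurd he (by simp)
  have h1 : pvLineSplit a [] = pvLineSplit (m ++ w2) w1 := by
    conv_lhs => rw [hdec]
    rw [pv_ls_ws_prefix w1 (m ++ w2) [] hw1ws]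
    simp
  have h2 : (pvLineSplit (m ++ w2) w1).map PySem.Chars.strip
      = (pvLineSplit (m ++ w2) []).map PySem.Chars.strip := by
    rw [pv_ls_tok (m ++ w2) w1, pv_ls_tok (m ++ w2) []]
    simp only [List.map_cons, List.nil_append]
    rw [pv_strip_ws_prefix w1 _ hw1ws]
    simp
  have h3 : (pvLineSplit (m ++ w2) []).map PySem.Chars.strip
      = (pvLineSplit m []).map PySem.Chars.strip :=
    pv_ls_ws_suffix m w2 [] hw2ws hJ
  rw [h1, h2, h3, pv_splitOn_eq_lineSplit]

theorem pv_scan_tokws_aux (n : Nat) : ∀ (l w tok : List Char) (out : List (List Char)),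
    l.length ≤ n → (∀ c ∈ w, PySem.Chars.isspace c = true) →
    pvScan l (w ++ tok) out = pvScan l tok out := by
  induction n with
  | zero =>
    intro l w tok out hl hw
    have : l = [] := List.eq_nil_of_length_eq_zero (Nat.le_zero.mp hl)
    subst this
    exact pv_emit_congr out _ _ (pv_strip_ws_prefix w tok hw)
  | succ n ih =>
    intro l w tok out hl hw
    cases l with
    | nil => exact pv_emit_congr out _ _ (pv_strip_ws_prefix w tok hw)
    | cons c r =>
      have hr : r.length ≤ n := by simpa using Nat.lt_succ_iff.mp (by simpa using hl)
      by_cases hp : c = ',' ∧ r.head? = some ' '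
      · obtain ⟨hc, hh⟩ := hp
        subst hc
        cases r with
        | nil => simp at hh
        | cons r0 r' =>
          simp only [List.head?_cons, Option.some.injEq] at hh
          subst hh
          rw [pv_scan_delim, pv_scan_delim,
            pv_emit_congr out _ _ (pv_strip_ws_prefix w tok hw)]
      · rw [pv_scan_cons c r _ out hp, pv_scan_cons c r tok out hp]
        by_cases hb : (c == '\n' || c == '\x0d') = true
        · rw [hb]
          simp only [if_true, pv_emit_congr out _ _ (pv_strip_ws_prefix w tok hw)]
        · simp only [Bool.not_eq_true] at hb
          rw [hb]
          simp only [Bool.false_eq_true, if_false, List.append_assoc]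
          exact ih r w (tok ++ [c]) out hr hw

theorem pv_scan_tokws (l w tok : List Char) (out : List (List Char))
    (hw : ∀ c ∈ w, PySem.Chars.isspace c = true) :
    pvScan l (w ++ tok) out = pvScan l tok out :=
  pv_scan_tokws_aux l.length l w tok out le_rfl hw

theorem pv_scan_allws (u : List Char) : ∀ (tok : List Char) (out : List (List Char)),
    (∀ c ∈ u, pvDomChar c = true) → (∀ c ∈ u, PySem.Chars.isspace c = true) →
    pvScan u tok out = pvEmit out tok := by
  induction u with
  | nil => intro tok out _ _; rfl
  | cons c r ih =>
    intro tok out hd hw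
    have ih' := fun tok out => ih tok out (fun x hx => hd x (by simp [hx])) (fun x hx => hw x (by simp [hx]))
    have hp : ¬(c = ',' ∧ r.head? = some ' ') := by
      rintro ⟨h1, -⟩
      subst h1
      exact absurd (hw ',' (by simp)) (by decide)
    rw [pv_scan_cons c r tok out hp]
    rcases pv_dom_ws c (hd c (by simp)) (hw c (by simp)) with h | h | h | h <;> subst h
    · rw [(rfl : ((' ' : Char) == '\n' || (' ' : Char) == '\x0d') = false)]
      rw [ih' (tok ++ [' ']) out]
      exact pv_emit_congr out _ _ (pv_strip_ws_suffix tok [' ']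
        (by intro x hx; simp at hx; subst hx; rfl))
    · rw [(rfl : (('\t' : Char) == '\n' || ('\t' : Char) == '\x0d') = false)]
      rw [ih' (tok ++ ['\t']) out]
      exact pv_emit_congr out _ _ (pv_strip_ws_suffix tok ['\t']
        (by intro x hx; simp at hx; subst hx; rfl))
    · rw [(rfl : (('\n' : Char) == '\n' || ('\n' : Char) == '\x0d') = true)]
      rw [ih' [] (pvEmit out tok), pv_emit_nil]
      simp
    · rw [(rfl : (('\x0d' : Char) == '\n' || ('\x0d' : Char) == '\x0d') = true)]
      rw [ih' [] (pvEmit out tok), pv_emit_nil]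
      simp

theorem pv_scan_wsprefix (w : List Char) : ∀ (M : List Char) (out : List (List Char)),
    (∀ c ∈ w, pvDomChar c = true) → (∀ c ∈ w, PySem.Chars.isspace c = true) →
    pvScan (w ++ M) [] out = pvScan M [] out := by
  induction w with
  | nil => intro M out _ _; rfl
  | cons c r ih =>
    intro M out hd hw
    have ih' := ih M out (fun x hx => hd x (by simp [hx])) (fun x hx => hw x (by simp [hx]))
    have hp : ¬(c = ',' ∧ (r ++ M).head? = some ' ') := by
      rintro ⟨h1, -⟩
      subst h1
      exact absurd (hw ',' (by simp)) (by decide)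
    rw [List.cons_append, pv_scan_cons c (r ++ M) [] out hp]
    rcases pv_dom_ws c (hd c (by simp)) (hw c (by simp)) with h | h | h | h <;> subst h
    · rw [(rfl : ((' ' : Char) == '\n' || (' ' : Char) == '\x0d') = false)]
      simp only [List.nil_append]
      rw [show ([' '] : List Char) = [' '] ++ ([] : List Char) by simp]
      rw [pv_scan_tokws (r ++ M) [' '] [] out
        (by intro x hx; simp at hx; subst hx; rfl)]
      exact ih'
    · rw [(rfl : (('\t' : Char) == '\n' || ('\t' : Char) == '\x0d') = false)]
      simp only [List.nil_append]
      rw [show (['\t'] : List Char) = ['\t'] ++ ([] : List Char) by simp]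
      rw [pv_scan_tokws (r ++ M) ['\t'] [] out
        (by intro x hx; simp at hx; subst hx; rfl)]
      exact ih'
    · rw [(rfl : (('\n' : Char) == '\n' || ('\n' : Char) == '\x0d') = true)]
      rw [pv_emit_nil]
      exact ih'
    · rw [(rfl : (('\x0d' : Char) == '\n' || ('\x0d' : Char) == '\x0d') = true)]
      rw [pv_emit_nil]
      exact ih'

theorem pv_scan_wssuffix_aux (n : Nat) : ∀ (M w tok : List Char) (out : List (List Char)),
    M.length ≤ n →
    (∀ c ∈ w, pvDomChar c = true) → (∀ c ∈ w, PySem.Chars.isspace c = true) →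
    ¬(w.head? = some ' ' ∧ M.getLast? = some ',') →
    pvScan (M ++ w) tok out = pvScan M tok out := by
  induction n with
  | zero =>
    intro M w tok out hM hd hw hJ
    have : M = [] := List.eq_nil_of_length_eq_zero (Nat.le_zero.mp hM)
    subst this
    rw [List.nil_append, pv_scan_allws w tok out hd hw, pv_scan_nil]
  | succ n ih =>
    intro M w tok out hM hd hw hJ
    cases M with
    | nil => rw [List.nil_append, pv_scan_allws w tok out hd hw, pv_scan_nil]
    | cons c r =>
      have hr : r.length ≤ n := by simpa using Nat.lt_succ_iff.mp (by simpa using hM)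
      by_cases hp : c = ',' ∧ r.head? = some ' '
      · obtain ⟨hc, hh⟩ := hp
        subst hc
        cases r with
        | nil => simp at hh
        | cons r0 r' =>
          simp only [List.head?_cons, Option.some.injEq] at hh
          subst hh
          rw [List.cons_append, List.cons_append, pv_scan_delim, pv_scan_delim]
          apply ih r' w [] (pvEmit out tok) (by simpa using Nat.le_of_succ_le hr) hd hw
          rintro ⟨hq1, hq2⟩
          cases r' with
          | nil => simp at hq2
          | cons d r'' =>
            exact hJ ⟨hq1, by simpa [List.getLast?_cons_cons] using hq2⟩
      · have hp' : ¬(c = ',' ∧ (r ++ w).head? = some ' ') := by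
          rintro ⟨h1, h2⟩
          cases r with
          | nil => exact hJ ⟨by simpa using h2, by simp [h1]⟩
          | cons r0 r' => exact hp ⟨h1, by simpa using h2⟩
        rw [List.cons_append, pv_scan_cons c (r ++ w) tok out hp', pv_scan_cons c r tok out hp]
        have hJ' : ¬(w.head? = some ' ' ∧ r.getLast? = some ',') := by
          rintro ⟨hq1, hq2⟩
          cases r with
          | nil => simp at hq2
          | cons r0 r' => exact hJ ⟨hq1, by simpa [List.getLast?_cons_cons] using hq2⟩
        by_cases hb : (c == '\n' || c == '\x0d') = true
        · rw [hb]
          simp only [if_true]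
          exact ih r w [] (pvEmit out tok) hr hd hw hJ'
        · simp only [Bool.not_eq_true] at hb
          rw [hb]
          simp only [Bool.false_eq_true, if_false]
          exact ih r w (tok ++ [c]) out hr hd hw hJ'

theorem pv_scan_strip (L : List Char) (out : List (List Char))
    (hd : ∀ c ∈ L, pvDomChar c = true) (he : pvEatenB L = false) :
    pvScan L [] out = pvScan (PySem.Chars.strip L) [] out := by
  have hdec := pv_strip_decomp L
  set w1 := List.takeWhile PySem.Chars.isspace L with hw1def
  set w2 := (List.takeWhile PySem.Chars.isspace (PySem.Chars.lstrip L).reverse).reverse with hw2def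
  set m := PySem.Chars.strip L with hmdef
  have hw1ws : ∀ c ∈ w1, PySem.Chars.isspace c = true := fun c hc => List.mem_takeWhile_imp hc
  have hw1dom : ∀ c ∈ w1, pvDomChar c = true := by
    intro c hc
    apply hd
    rw [hdec]
    simp only [List.mem_append]
    left; exact hc
  have hw2ws : ∀ c ∈ w2, PySem.Chars.isspace c = true := by
    intro c hc
    rw [hw2def, List.mem_reverse] at hc
    exact List.mem_takeWhile_imp hc
  have hw2dom : ∀ c ∈ w2, pvDomChar c = true := by
    intro c hc
    apply hd
    rw [hdec]
    simp only [List.mem_append]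
    right; right; exact hc
  have hJ : ¬(w2.head? = some ' ' ∧ m.getLast? = some ',') := by
    rintro ⟨hq1, hq2⟩
    have hj := pv_eaten_junction w1 m w2 hw2dom hw2ws hq2 hq1
    rw [List.append_assoc, ← hdec] at hj
    rw [hj] at he
    exact absurd he (by simp)
  conv_lhs => rw [hdec]
  rw [pv_scan_wsprefix w1 (m ++ w2) out hw1dom hw1ws]
  exact pv_scan_wssuffix_aux m.length m w2 [] out le_rfl hw2dom hw2ws hJ

theorem pv_scan_line_nil (t tok : List Char) (out : List (List Char))
    (ht : t = [] ∨ ∃ c r, t = c :: r ∧ (c = '\n' ∨ c = '\x0d')) :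
    pvScan t tok out
      = pvContinue t (out ++ ((pvLineSplit [] tok).map PySem.Chars.strip).filter (fun p => !p.isEmpty)) := by
  rcases ht with h | ⟨c, r, hcr, hb⟩
  · subst h
    rw [pv_scan_nil, pv_ls_nil, pv_emit_eq]
    rfl
  · subst hcr
    have hp : ¬(c = ',' ∧ r.head? = some ' ') := by
      rintro ⟨h1, -⟩
      rcases hb with h | h <;> simp [h] at h1
    rw [pv_scan_cons c r tok out hp]
    have hbb : (c == '\n' || c == '\x0d') = true := by
      rcases hb with h | h <;> simp [h]
    rw [hbb]
    simp only [if_true]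
    rw [pv_ls_nil, pv_emit_eq]
    rfl

theorem pv_scan_line_aux (n : Nat) : ∀ (a t tok : List Char) (out : List (List Char)),
    a.length ≤ n →
    (∀ c ∈ a, (c == '\n' || c == '\x0d') = false) →
    (t = [] ∨ ∃ c r, t = c :: r ∧ (c = '\n' ∨ c = '\x0d')) →
    pvScan (a ++ t) tok out
      = pvContinue t (out ++ ((pvLineSplit a tok).map PySem.Chars.strip).filter (fun p => !p.isEmpty)) := by
  induction n with
  | zero =>
    intro a t tok out ha hnb ht
    have : a = [] := List.eq_nil_of_length_eq_zero (Nat.le_zero.mp ha)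
    subst this
    simpa using pv_scan_line_nil t tok out ht
  | succ n ih =>
    intro a t tok out ha hnb ht
    cases a with
    | nil => simpa using pv_scan_line_nil t tok out ht
    | cons c r =>
      have hr : r.length ≤ n := by simpa using Nat.lt_succ_iff.mp (by simpa using ha)
      have hnb' : ∀ x ∈ r, (x == '\n' || x == '\x0d') = false :=
        fun x hx => hnb x (by simp [hx])
      by_cases hp : c = ',' ∧ r.head? = some ' '
      · obtain ⟨hc, hh⟩ := hp
        subst hc
        cases r with
        | nil => simp at hh
        | cons r0 r' =>
          simp only [List.head?_cons, Option.some.injEq] at hh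
          subst hh
          rw [List.cons_append, List.cons_append, pv_scan_delim]
          rw [ih r' t [] (pvEmit out tok) (by simpa using Nat.le_of_succ_le hr)
            (fun x hx => hnb x (by simp [hx])) ht]
          rw [pv_ls_delim, pv_emit_eq]
          simp only [List.map_cons, List.filter_cons, List.filter_nil]
          split_ifs <;> simp
      · have hp' : ¬(c = ',' ∧ (r ++ t).head? = some ' ') := by
          rintro ⟨h1, h2⟩
          cases r with
          | nil =>
            rcases ht with h | ⟨c', r', hcr, hb⟩
            · subst h; simp at h2
            · subst hcr
              simp only [List.nil_append, List.head?_cons, Option.some.injEq] at h2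
              rcases hb with h | h <;> rw [h2] at h <;> simp at h
          | cons r0 r' => exact hp ⟨h1, by simpa using h2⟩
        rw [List.cons_append, pv_scan_cons c (r ++ t) tok out hp']
        rw [hnb c (by simp)]
        simp only [Bool.false_eq_true, if_false]
        rw [ih r t (tok ++ [c]) out hr hnb' ht]
        rw [pv_ls_cons c r tok hp]

theorem pv_go_noB (isB : Char → Bool) (a : List Char)
    (ha : ∀ c ∈ a, isB c = false ∧ c ≠ '\x0d') : ∀ (t cur : List Char) (acc : List (List Char)),
    PySem.Chars.splitlines.go isB (a ++ t) cur acc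
      = PySem.Chars.splitlines.go isB t (a.reverse ++ cur) acc := by
  induction a with
  | nil => intro t cur acc; simp
  | cons c a' ih =>
    intro t cur acc
    rw [List.cons_append, PySem.Chars.splitlines.go]
    case x_3 => intro r1 hc _; exact (ha c (by simp)).2 hc
    rw [(ha c (by simp)).1]
    simp only [Bool.false_eq_true, if_false]
    rw [ih (fun x hx => ha x (by simp [hx])) t (c :: cur) acc]
    simp

theorem pv_splitlines_go_stop (isB : Char → Bool) (cur : List Char) (acc : List (List Char)) :
    PySem.Chars.splitlines.go isB [] cur acc
      = if cur.isEmpty then acc.reverse else (cur.reverse :: acc).reverse := by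
  rw [PySem.Chars.splitlines.go]

def pvIsB : Char → Bool := fun c =>
  decide (c.toNat = 10) || decide (c.toNat = 13) || decide (c.toNat = 11) || decide (c.toNat = 12) ||
    decide (c.toNat = 28) || decide (c.toNat = 29) || decide (c.toNat = 30) ||
    decide (c.toNat = 133) || decide (c.toNat = 8232) || decide (c.toNat = 8233)

theorem pv_splitlines_eq (s : List Char) :
    PySem.Chars.splitlines s = PySem.Chars.splitlines.go pvIsB s [] [] := rfl

theorem pv_dom_isB (c : Char) (hd : pvDomChar c = true) (hb : (c == '\n' || c == '\x0d') = false) :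
    pvIsB c = false := by
  have h10 : c.toNat ≠ 10 := by
    intro h
    have hc : c = '\n' := pv_char_eq (show c.toNat = ('\n' : Char).toNat by rw [h]; rfl)
    subst hc
    simp at hb
  have h13 : c.toNat ≠ 13 := by
    intro h
    have hc : c = '\x0d' := pv_char_eq (show c.toNat = ('\x0d' : Char).toNat by rw [h]; rfl)
    subst hc
    simp at hb
  simp only [pvDomChar, Bool.or_eq_true, Bool.and_eq_true, decide_eq_true_eq, beq_iff_eq,
    Nat.beq_eq_true_eq] at hd
  simp only [pvIsB, Bool.or_eq_false_iff, decide_eq_false_iff_not]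
  omega

theorem pv_splitlines_noB (a : List Char) (hne : a ≠ [])
    (ha : ∀ c ∈ a, pvDomChar c = true)
    (hnb : ∀ c ∈ a, (c == '\n' || c == '\x0d') = false) :
    PySem.Chars.splitlines a = [a] := by
  have hcond : ∀ c ∈ a, pvIsB c = false ∧ c ≠ '\x0d' := by
    intro c hc
    refine ⟨pv_dom_isB c (ha c hc) (hnb c hc), ?_⟩
    intro h
    subst h
    have := hnb '\x0d' hc
    simp at this
  rw [pv_splitlines_eq]
  have hgo := pv_go_noB pvIsB a hcond [] [] []
  rw [List.append_nil] at hgo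
  rw [hgo, pv_splitlines_go_stop]
  simp [hne]

theorem pv_go_break (c : Char) (r cur : List Char) (acc : List (List Char))
    (hb : pvIsB c = true) (hne : c = '\x0d' → r.head? ≠ some '\n') :
    PySem.Chars.splitlines.go pvIsB (c :: r) cur acc
      = PySem.Chars.splitlines.go pvIsB r [] (cur.reverse :: acc) := by
  rw [PySem.Chars.splitlines.go]
  case x_3 => intro r1 hcc hr2; exact hne hcc (by rw [hr2]; rfl)
  simp only [hb, if_pos]

theorem pv_go_crlf (r cur : List Char) (acc : List (List Char)) :
    PySem.Chars.splitlines.go pvIsB ('\x0d' :: '\n' :: r) cur acc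
      = PySem.Chars.splitlines.go pvIsB r [] (cur.reverse :: acc) := by
  rw [PySem.Chars.splitlines.go]

theorem pv_splitlines_dec (a : List Char) (c : Char) (r : List Char)
    (ha : ∀ x ∈ a, pvDomChar x = true)
    (hnb : ∀ x ∈ a, (x == '\n' || x == '\x0d') = false)
    (hc : c = '\n' ∨ c = '\x0d') :
    PySem.Chars.splitlines (a ++ c :: r)
      = a :: PySem.Chars.splitlines (if c = '\x0d' ∧ r.head? = some '\n' then r.tail else r) := by
  have hcond : ∀ x ∈ a, pvIsB x = false ∧ x ≠ '\x0d' := by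
    intro x hx
    refine ⟨pv_dom_isB x (ha x hx) (hnb x hx), ?_⟩
    intro h
    subst h
    have := hnb '\x0d' hx
    simp at this
  rw [pv_splitlines_eq, pv_go_noB pvIsB a hcond (c :: r) [] []]
  rcases hc with hc | hc
  · subst hc
    rw [pv_go_break '\n' r (a.reverse ++ []) []
      (by rfl) (fun h => absurd h (by decide))]
    simp only [List.append_nil, List.reverse_reverse]
    rw [pv_splitlines_go_acc_aux pvIsB r [] [] [a]]
    rw [if_neg (by rintro ⟨h1, -⟩; exact absurd h1 (by decide))]
    rw [pv_splitlines_eq]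
    simp
  · subst hc
    by_cases hh : r.head? = some '\n'
    · cases r with
      | nil => simp at hh
      | cons r0 r₂ =>
        simp only [List.head?_cons, Option.some.injEq] at hh
        subst hh
        rw [pv_go_crlf r₂ (a.reverse ++ []) []]
        simp only [List.append_nil, List.reverse_reverse]
        rw [pv_splitlines_go_acc_aux pvIsB r₂ [] [] [a]]
        rw [if_pos (by simp)]
        rw [pv_splitlines_eq]
        simp
    · rw [pv_go_break '\x0d' r (a.reverse ++ []) [] (by rfl) (fun _ h => hh h)]
      simp only [List.append_nil, List.reverse_reverse]
      rw [pv_splitlines_go_acc_aux pvIsB r [] [] [a]]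
      rw [if_neg (by rintro ⟨-, h2⟩; exact hh h2)]
      rw [pv_splitlines_eq]
      simp

theorem pv_flat_nil : pvFlat [] = [] := rfl

theorem pv_flat_cons (a : List Char) (ls : List (List Char)) :
    pvFlat (a :: ls)
      = ((PySem.Chars.splitOn (PySem.Chars.strip a) [',', ' ']).map PySem.Chars.strip).filter
          (fun p => !p.isEmpty) ++ pvFlat ls := by
  simp [pvFlat, List.filter_append]

theorem pv_main (n : Nat) : ∀ (L : List Char) (out : List (List Char)), L.length ≤ n →
    (∀ c ∈ L, pvDomChar c = true) → pvEatenB L = false →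
    pvScan L [] out = out ++ pvFlat (PySem.Chars.splitlines L) := by
  induction n with
  | zero =>
    intro L out hL hd he
    have : L = [] := List.eq_nil_of_length_eq_zero (Nat.le_zero.mp hL)
    subst this
    rw [pv_scan_nil, pv_emit_nil, pv_splitlines_nil, pv_flat_nil, List.append_nil]
  | succ n ih =>
    intro L out hL hd he
    have hdec : L = L.takeWhile (fun c => !(c == '\n' || c == '\x0d'))
        ++ L.dropWhile (fun c => !(c == '\n' || c == '\x0d')) :=
      (List.takeWhile_append_dropWhile).symm
    set a := L.takeWhile (fun c => !(c == '\n' || c == '\x0d')) with hadef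
    set t := L.dropWhile (fun c => !(c == '\n' || c == '\x0d')) with htdef
    have hanb : ∀ c ∈ a, (c == '\n' || c == '\x0d') = false := by
      intro c hc
      have := List.mem_takeWhile_imp hc
      simpa using this
    have hadom : ∀ c ∈ a, pvDomChar c = true := by
      intro c hc
      exact hd c (by rw [hdec]; exact List.mem_append_left _ hc)
    cases ht : t with
    | nil =>
      have hLa : L = a := by rw [hdec, ht, List.append_nil]
      by_cases hanil : a = []
      · rw [hLa, hanil, pv_scan_nil, pv_emit_nil, pv_splitlines_nil, pv_flat_nil, List.append_nil]
      · rw [hLa]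
        have h1 := pv_scan_line_aux a.length a [] [] out le_rfl hanb (Or.inl rfl)
        rw [List.append_nil] at h1
        rw [h1]
        show out ++ _ = _
        rw [pv_line a hadom (hLa ▸ he)]
        rw [pv_splitlines_noB a hanil hadom hanb, pv_flat_cons, pv_flat_nil, List.append_nil]
    | cons c r =>
      have htne : L.dropWhile (fun c => !(c == '\n' || c == '\x0d')) ≠ [] := by
        rw [← htdef, ht]; simp
      have hcb : (c == '\n' || c == '\x0d') = true := by
        have h3 := List.head_dropWhile_not (fun c => !(c == '\n' || c == '\x0d')) (l := L) (w := htne)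
        have ht' : L.dropWhile (fun c => !(c == '\n' || c == '\x0d')) = c :: r := by rw [← htdef, ht]
        simp only [ht', List.head_cons] at h3
        cases hb2 : (c == '\n' || c == '\x0d') with
        | true => rfl
        | false => rw [hb2] at h3; simp at h3
      have hcor : c = '\n' ∨ c = '\x0d' := by
        rcases Bool.or_eq_true_iff.mp hcb with h | h
        · exact Or.inl (by simpa using h)
        · exact Or.inr (by simpa using h)
      have hL' : L = a ++ c :: r := by rw [hdec, ht]
      have heolt : pvEolWsB (c :: r) = true := by
        simp only [pvEolWsB]
        rw [hcb]
        simp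
      have heA : pvEatenB a = false := by
        by_contra h'
        simp only [Bool.not_eq_false] at h'
        have := pv_eaten_append_right a (c :: r) heolt h'
        rw [← hL'] at this
        rw [this] at he
        exact absurd he (by simp)
      have h1 := pv_scan_line_aux a.length a (c :: r) [] out le_rfl hanb (Or.inr ⟨c, r, rfl, hcor⟩)
      rw [hL', h1]
      show pvScan r [] _ = _
      have hrlen : r.length ≤ n := by
        rw [hL'] at hL
        simp at hL
        omega
      set FL := List.filter (fun p => !p.isEmpty) (List.map PySem.Chars.strip (pvLineSplit a [])) with hFL
      set r' := if c = '\x0d' ∧ r.head? = some '\n' then r.tail else r with hr'def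
      have hscan : pvScan r [] (out ++ FL) = pvScan r' [] (out ++ FL) := by
        by_cases hcr : c = '\x0d' ∧ r.head? = some '\n'
        · have hr'eq : r' = r.tail := hr'def.trans (if_pos hcr)
          obtain ⟨hc1, hh⟩ := hcr
          cases r with
          | nil => simp at hh
          | cons r0 r₂ =>
            simp only [List.head?_cons, Option.some.injEq] at hh
            subst hh
            rw [hr'eq]
            rw [pv_scan_cons '\n' r₂ [] (out ++ FL) (by rintro ⟨h1, -⟩; exact absurd h1 (by decide))]
            rw [(rfl : (('\n' : Char) == '\n' || ('\n' : Char) == '\x0d') = true)]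
            simp [pv_emit_nil]
        · have hr'eq : r' = r := hr'def.trans (if_neg hcr)
          rw [hr'eq]
      rw [hscan]
      have hr'len : r'.length ≤ n := by
        rw [hr'def]
        split
        · exact le_trans (by simp [List.length_tail]) hrlen
        · exact hrlen
      have hr'sub : ∀ x ∈ r', x ∈ r := by
        intro x hx
        rw [hr'def] at hx
        split at hx
        · exact List.mem_of_mem_tail hx
        · exact hx
      have hr'dom : ∀ x ∈ r', pvDomChar x = true := by
        intro x hx
        exact hd x (by rw [hL']; exact List.mem_append_right _ (by simp [hr'sub x hx]))
      have hr'eaten : pvEatenB r' = false := by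
        by_contra h'
        simp only [Bool.not_eq_false] at h'
        have hbig : pvEatenB L = true := by
          rw [hr'def] at h'
          by_cases hcr : c = '\x0d' ∧ r.head? = some '\n'
          · rw [if_pos hcr] at h'
            obtain ⟨hc1, hh⟩ := hcr
            cases r with
            | nil => simp at hh
            | cons r0 r₂ =>
              simp only [List.head?_cons, Option.some.injEq] at hh
              subst hh
              rw [hL', show a ++ c :: '\n' :: r₂ = (a ++ [c, '\n']) ++ r₂ by simp]
              exact pv_eaten_append_left _ _ (by simpa using h')
          · rw [if_neg hcr] at h'
            rw [hL', show a ++ c :: r = (a ++ [c]) ++ r by simp]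
            exact pv_eaten_append_left _ _ h'
        rw [hbig] at he
        exact absurd he (by simp)
      rw [ih r' (out ++ FL) hr'len hr'dom hr'eaten]
      rw [pv_splitlines_dec a c r hadom hanb hcor, ← hr'def, pv_flat_cons]
      rw [hFL, pv_line a hadom heA]
      simp [List.append_assoc]

-- ===== VERDICT (by name: the statement is the Claim_ definition above) =====
theorem split_filenames_spec : Claim_unchanged_split_filenames := by
  intro cell hdom hD
  show split_filenames cell = split_filenames_alt cell
  have hL : ∀ c ∈ cell.toList, pvDomChar c = true := by
    have h := hdom
    simp only [Dom_split_filenames, pvDomStr, List.all_eq_true] at h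
    exact h
  have he : pvEatenB cell.toList = false := by
    rw [← pv_D_eq]
    refine Bool.eq_false_iff.mpr ?_
    intro h
    apply hD
    unfold D_split_filenames
    rcases List.any_eq_true.mp h with ⟨t, ht, hq⟩
    exact ⟨t, ht, (pv_Q_iff t).mpr hq⟩
  rw [pv_A_flat]
  show _ = (pvScan cell.toList [] []).map (fun cs => String.ofList cs)
  rw [pv_scan_strip cell.toList [] hL he]
  have hsub : ∀ c ∈ PySem.Chars.strip cell.toList, pvDomChar c = true := by
    intro c hc
    apply hL
    have h1 : PySem.Chars.strip cell.toList <+: PySem.Chars.lstrip cell.toList :=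
      pv_rstrip_prefix _
    have h2 : c ∈ PySem.Chars.lstrip cell.toList := h1.subset hc
    exact (List.dropWhile_sublist _).subset h2
  have he' : pvEatenB (PySem.Chars.strip cell.toList) = false := by
    by_contra h'
    simp only [Bool.not_eq_false] at h'
    rw [pv_eaten_strip cell.toList hL h'] at he
    exact absurd he (by simp)
  rw [pv_main (PySem.Chars.strip cell.toList).length (PySem.Chars.strip cell.toList) [] le_rfl
    hsub he']
  simp

theorem split_filenames_changed : Claim_changed_split_filenames := by
  unfold Claim_changed_split_filenames
  refine ⟨by decide, ?_, by decide, by decide, by decide⟩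
  unfold D_split_filenames
  refine ⟨[',', ' '], by decide, by decide, ?_⟩
  intro c hc
  simp at hc
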